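-- pv_equiv track=rewrite | github.com/jorgesilva2407/Simplex | utils.py | remove_op_minus
-- ===== SOURCE A (Python) =====
-- def remove_op_minus(exp):
--     """
--     Remove a operacao de subtracao da expressao e a substitui pela soma com a negacao do proximo termo
--
--     Args:
--         exp (list of strings): lista com os tokens da expressao
--
--     Returns:
--         list of strings: a versao extendida da expressao avaliada
--     """
--     norm_expr = []
--     buffer = ''
--     for token in exp:
--         if buffer != '':
--             norm_expr.append(buffer+token)
--             buffer = ''
--             continue
--
--         if token == '-':
--             norm_expr.append('+')
--             buffer = '-'
--         else:
--             norm_expr.append(token)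
--     return norm_expr
-- ===== SOURCE B (Python) =====
-- def remove_op_minus(exp):
--     """Staged version: first compute which tokens are consumed (negated) by a
--     preceding separator '-', then map every token independently of its neighbours."""
--     consumed = []
--     c = False
--     for t in exp:
--         consumed.append(c)
--         c = (t == '-') and not c
--     return ['-' + t if c else ('+' if t == '-' else t)
--             for t, c in zip(exp, consumed)]
-- ===== Notes on version B (the rewrite author's own statement) =====
-- stated objective: alternative
-- what changed: Replaces A's single stateful buffer pass with two staged passes: a first scan computes a boolean 'consumed' flag list (which tokens are negated by a preceding separator minus), then a stateless comprehension maps each (token, flag) pair independently.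
import Mathlib
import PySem

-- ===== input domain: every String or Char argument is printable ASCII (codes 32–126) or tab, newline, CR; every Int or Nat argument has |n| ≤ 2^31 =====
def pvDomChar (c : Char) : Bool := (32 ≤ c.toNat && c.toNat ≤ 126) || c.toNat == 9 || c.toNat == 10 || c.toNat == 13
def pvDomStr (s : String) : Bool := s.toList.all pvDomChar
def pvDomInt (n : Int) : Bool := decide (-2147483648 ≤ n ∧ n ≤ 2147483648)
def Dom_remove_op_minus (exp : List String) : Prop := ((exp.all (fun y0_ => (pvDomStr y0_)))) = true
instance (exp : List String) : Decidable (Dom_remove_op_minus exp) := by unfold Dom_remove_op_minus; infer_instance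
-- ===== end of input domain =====

-- B replaces A's single stateful buffer pass with two staged passes (a consumed-flag
-- scan, then a stateless per-token map); alternative decomposition, same cost.


-- ===== PORT A =====
-- A: fold over the tokens carrying (norm_expr, buffer); a pending buffer is glued to
-- the next token, a '-' emits '+' and sets the buffer.
def remove_op_minus_step (st : List String × String) (token : String) : List String × String :=
  if st.2 ≠ "" then (st.1 ++ [st.2 ++ token], "")
  else if token = "-" then (st.1 ++ ["+"], "-")
  else (st.1 ++ [token], st.2)

def remove_op_minus (exp : List String) : List String :=
  (exp.foldl remove_op_minus_step ([], "")).1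

-- ===== PORT B =====
-- B stage 1: the consumed-flag list (Source B's first loop over c).
def remove_op_minus_flags : Bool → List String → List Bool
  | _, [] => []
  | c, t :: r => c :: remove_op_minus_flags ((t = "-") && !c) r

-- B stage 2: stateless map over (token, flag) pairs (Source B's comprehension over zip).
def remove_op_minus_alt (exp : List String) : List String :=
  (exp.zip (remove_op_minus_flags false exp)).map
    (fun p => if p.2 then "-" ++ p.1 else if p.1 = "-" then "+" else p.1)

-- ===== PRECONDITION & SPEC =====
def Spec_remove_op_minus (exp : List String) (out : List String) : Prop := out = remove_op_minus_alt exp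
instance (exp : List String) (out : List String) : Decidable (Spec_remove_op_minus exp out) := by unfold Spec_remove_op_minus; infer_instance

-- ===== CLAIM (what is proved, stated in full; the proofs are below) =====
def Claim_equal_remove_op_minus : Prop := ∀ (exp : List String), Dom_remove_op_minus exp → Spec_remove_op_minus exp (remove_op_minus exp)

-- ===== LEMMAS AND PROOFS =====
-- Invariant tying A's fold state to B's flag: A's buffer is "-" exactly when the
-- current flag is true; the fold then appends B's mapped zip of the remaining tokens.
theorem remove_op_minus_fold_eq (l : List String) :
    ∀ (c : Bool) (acc : List String),
      (l.foldl remove_op_minus_step (acc, if c then "-" else "")).1 =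
        acc ++ (l.zip (remove_op_minus_flags c l)).map
          (fun p => if p.2 then "-" ++ p.1 else if p.1 = "-" then "+" else p.1) := by
  induction l with
  | nil => intro c acc; simp [remove_op_minus_flags]
  | cons t r ih =>
    intro c acc
    cases c with
    | true =>
      rw [show (if true = true then "-" else "") = "-" from rfl]
      have e : remove_op_minus_step (acc, "-") t = (acc ++ ["-" ++ t], "") := by
        simp [remove_op_minus_step]
      rw [List.foldl_cons, e]
      have := ih false (acc ++ ["-" ++ t])
      simp only [if_neg (by simp : ¬ False = True)] at this
      simpa [remove_op_minus_flags, List.append_assoc] using ih false (acc ++ ["-" ++ t])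
    | false =>
      rw [show (if false = true then "-" else "") = "" from rfl]
      by_cases ht : t = "-"
      · subst ht
        have e : remove_op_minus_step (acc, "") "-" = (acc ++ ["+"], "-") := by
          simp [remove_op_minus_step]
        rw [List.foldl_cons, e]
        simpa [remove_op_minus_flags, List.append_assoc] using ih true (acc ++ ["+"])
      · have e : remove_op_minus_step (acc, "") t = (acc ++ [t], "") := by
          simp [remove_op_minus_step, ht]
        rw [List.foldl_cons, e]
        simpa [remove_op_minus_flags, ht, List.append_assoc] using ih false (acc ++ [t])

-- ===== VERDICT (by name: the statement is the Claim_ definition above) =====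
theorem remove_op_minus_spec : Claim_equal_remove_op_minus := by
  intro exp _
  unfold Spec_remove_op_minus remove_op_minus remove_op_minus_alt
  simpa using remove_op_minus_fold_eq exp false []
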